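-- pv_equiv track=rewrite | github.com/gizentech/ai_kurume | python/server complete.py | process_json_array
-- ===== SOURCE A (Python) =====
-- def process_json_array(json_array):
--     """JSON配列内のTextフィールドを処理して文章として結合"""
--     result_parts = []
--     current_line = []
--
--     for item in json_array:
--         if isinstance(item, dict) and 'Text' in item:
--             text = item['Text']
--
--             if text == '':
--                 # 空のTextは改行として扱う
--                 if current_line:
--                     result_parts.append(''.join(current_line))
--                     current_line = []
--                 # 段落の区切りではなく、行の区切りとして扱う
--                 result_parts.append('')
--             else:
--                 # 非空のTextは現在の行に追加
--                 current_line.append(text)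
--
--     # 最後の行を追加
--     if current_line:
--         result_parts.append(''.join(current_line))
--
--     # 空の要素を除去して結合
--     final_parts = [part for part in result_parts if part.strip()]
--     return '\n'.join(final_parts)
-- ===== SOURCE B (Python) =====
-- def process_json_array(json_array):
--     """JSON配列内のTextフィールドを処理して文章として結合"""
--     texts = [item['Text'] for item in json_array
--              if isinstance(item, dict) and 'Text' in item]
--     lines = []
--     i, n = 0, len(texts)
--     while i < n:
--         if texts[i] == '':
--             i += 1
--             continue
--         j = i
--         while j < n and texts[j] != '':
--             j += 1
--         line = ''.join(texts[i:j])
--         if line.strip():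
--             lines.append(line)
--         i = j
--     return '\n'.join(lines)
-- ===== Notes on version B (the rewrite author's own statement) =====
-- stated objective: alternative
-- what changed: Replaces A's single pass with a mutable current_line accumulator and flush-on-empty sentinel logic (plus a trailing flush and a final filter pass over result_parts) by a two-phase run-splitting algorithm: first extract the Text values, then scan them with two indices, joining each maximal run of non-empty texts and keeping it immediately if its strip is truthy.
import Mathlib
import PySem

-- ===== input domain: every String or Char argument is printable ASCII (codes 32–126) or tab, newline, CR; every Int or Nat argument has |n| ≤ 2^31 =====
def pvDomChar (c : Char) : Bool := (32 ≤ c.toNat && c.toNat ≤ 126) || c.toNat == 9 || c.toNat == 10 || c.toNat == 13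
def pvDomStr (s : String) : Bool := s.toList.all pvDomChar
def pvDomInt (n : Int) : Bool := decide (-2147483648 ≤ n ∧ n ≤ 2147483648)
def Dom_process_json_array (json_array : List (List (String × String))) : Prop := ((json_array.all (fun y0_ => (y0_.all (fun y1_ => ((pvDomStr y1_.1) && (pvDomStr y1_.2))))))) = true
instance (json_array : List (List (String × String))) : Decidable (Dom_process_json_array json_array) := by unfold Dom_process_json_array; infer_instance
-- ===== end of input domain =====

-- B restructures A's flush-on-empty accumulator into extract-then-split-into-runs; same return value (alternative decomposition, no speed claim).

-- ===== PORT A =====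
-- one loop step of A's `for item in json_array`, acting on the text found (if any)
def pvStepT (s : List String × List String) (text : String) : List String × List String :=
  if text = "" then
    ((if s.2 ≠ [] then s.1 ++ [PySem.Str.join "" s.2] else s.1) ++ [""], [])
  else
    (s.1, s.2 ++ [text])

def pvStepA (s : List String × List String) (item : List (String × String)) : List String × List String :=
  match List.lookup "Text" item with   -- isinstance(item, dict) and 'Text' in item; item['Text'] = first match
  | none => s
  | some text => pvStepT s text

def process_json_array (json_array : List (List (String × String))) : String :=
  let s := json_array.foldl pvStepA ([], [])
  let result_parts := if s.2 ≠ [] then s.1 ++ [PySem.Str.join "" s.2] else s.1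
  let final_parts := result_parts.filter (fun p => PySem.Str.strip p != "")
  PySem.Str.join "\n" final_parts

-- ===== PORT B =====
-- Source B's index scan over `texts`: skip '' (outer continue), else advance j over the
-- non-empty run (takeWhile/dropWhile transcribe the inner while and texts[i:j]).
def pvSplitRuns : List String → List String
  | [] => []
  | t :: rest =>
    if t = "" then pvSplitRuns rest
    else
      let line := PySem.Str.join "" (t :: rest.takeWhile (fun x => x != ""))
      let tail := pvSplitRuns (rest.dropWhile (fun x => x != ""))
      if PySem.Str.strip line != "" then line :: tail else tail
termination_by l => l.length
decreasing_by
  · simp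
  · simpa using Nat.lt_succ_of_le (List.length_dropWhile_le _ rest)

def process_json_array_alt (json_array : List (List (String × String))) : String :=
  let texts := json_array.filterMap (fun item => List.lookup "Text" item)
  PySem.Str.join "\n" (pvSplitRuns texts)

-- ===== PRECONDITION & SPEC =====
def Spec_process_json_array (json_array : List (List (String × String))) (out : String) : Prop := out = process_json_array_alt json_array
instance (json_array : List (List (String × String))) (out : String) : Decidable (Spec_process_json_array json_array out) := by unfold Spec_process_json_array; infer_instance

-- ===== CLAIM (what is proved, stated in full; the proofs are below) =====
def Claim_equal_process_json_array : Prop := ∀ (json_array : List (List (String × String))), Dom_process_json_array json_array → Spec_process_json_array json_array (process_json_array json_array)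

-- ===== LEMMAS AND PROOFS =====
def pvP (p : String) : Bool := PySem.Str.strip p != ""

def pvFinish (s : List String × List String) : List String :=
  if s.2 ≠ [] then s.1 ++ [PySem.Str.join "" s.2] else s.1

lemma pvP_empty : pvP "" = false := by decide

lemma pv_foldA_eq (ja : List (List (String × String))) (s : List String × List String) :
    ja.foldl pvStepA s = (ja.filterMap (fun item => List.lookup "Text" item)).foldl pvStepT s := by
  induction ja generalizing s with
  | nil => rfl
  | cons it rest ih =>
    simp only [List.foldl_cons, List.filterMap_cons, pvStepA]
    cases List.lookup "Text" it with
    | none => exact ih s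
    | some t => simp [List.foldl_cons, ih]

lemma pv_finish_filter (parts cur : List String) :
    (pvFinish (parts, cur)).filter pvP
      = parts.filter pvP ++ [PySem.Str.join "" cur].filter pvP := by
  cases cur with
  | nil => simp [pvFinish, List.filter, pvP_empty, PySem.Str.join]
  | cons c cs => simp [pvFinish, List.filter_append]

lemma pv_splitRuns_step (ts : List String) :
    pvSplitRuns ts
      = [PySem.Str.join "" (ts.takeWhile (fun x => x != ""))].filter pvP
        ++ pvSplitRuns (ts.dropWhile (fun x => x != "")) := by
  cases ts with
  | nil => simp [pvSplitRuns, List.filter, pvP_empty, PySem.Str.join]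
  | cons t rest =>
    by_cases h : t = ""
    · subst h
      simp [pvSplitRuns, List.takeWhile, List.dropWhile, List.filter, pvP_empty, PySem.Str.join]
    · have h' : (t != "") = true := by simpa using h
      rw [pvSplitRuns]
      simp only [if_neg h, List.takeWhile_cons, h', if_true, List.dropWhile_cons]
      cases hb : (PySem.Str.strip (PySem.Str.join "" (t :: rest.takeWhile (fun x => x != ""))) != "") <;>
        simp [List.filter, pvP, hb]

lemma pv_main (ts : List String) (parts cur : List String) :
    (pvFinish (ts.foldl pvStepT (parts, cur))).filter pvP
      = parts.filter pvP
        ++ [PySem.Str.join "" (cur ++ ts.takeWhile (fun x => x != ""))].filter pvP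
        ++ pvSplitRuns (ts.dropWhile (fun x => x != "")) := by
  induction ts generalizing parts cur with
  | nil => simp [pv_finish_filter, pvSplitRuns]
  | cons t rest ih =>
    by_cases h : t = ""
    · subst h
      have hs : pvStepT (parts, cur) "" = (pvFinish (parts, cur) ++ [""], []) := by
        simp [pvStepT, pvFinish]
      rw [List.foldl_cons, hs, ih]
      have hfilt : (pvFinish (parts, cur) ++ [""]).filter pvP = (pvFinish (parts, cur)).filter pvP := by
        simp [List.filter_append, List.filter, pvP_empty]
      have hdrop : List.dropWhile (fun x => x != "") ("" :: rest) = "" :: rest := by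
        simp
      have htake : List.takeWhile (fun x => x != "") ("" :: rest) = ([] : List String) := by
        simp
      have hsr : pvSplitRuns ("" :: rest) = pvSplitRuns rest := by rw [pvSplitRuns]; simp
      rw [hfilt, pv_finish_filter, htake, hdrop, hsr, pv_splitRuns_step rest]
      simp [List.append_assoc]
    · have h' : (t != "") = true := by simpa using h
      have hs : pvStepT (parts, cur) t = (parts, cur ++ [t]) := by simp [pvStepT, h]
      rw [List.foldl_cons, hs, ih]
      simp [h', List.append_assoc]

-- ===== VERDICT (by name: the statement is the Claim_ definition above) =====
theorem process_json_array_spec : Claim_equal_process_json_array := by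
  intro ja _
  show process_json_array ja = process_json_array_alt ja
  simp only [process_json_array, process_json_array_alt]
  rw [pv_foldA_eq]
  have h := pv_main (ja.filterMap (fun item => List.lookup "Text" item)) [] []
  simp only [List.nil_append, List.filter_nil] at h
  rw [← pv_splitRuns_step] at h
  exact congrArg (PySem.Str.join "\n") h
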